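-- pv_equiv track=rewrite | github.com/piedro404/resolucoes-de-problemas | Uri/Crepúsculo em Portland.PY | analiseQ
-- ===== SOURCE A (Python) =====
-- def cam(quadra):
--     c = 0
--     for x in quadra:
--         c+= x.count(1)
--     if c > 1:
--         return "S"
--
--     return "U"
--
-- def analiseQ(quadras):
--     secQs = []
--     for x in range(len(quadras)-1):
--         secQ = []
--         for y in range(len(quadras[x])-1):
--             secQ.append(cam([[quadras[x][y], quadras[x][y+1]], [quadras[x+1][y], quadras[x+1][y+1]]]))
--
--         secQs.append(secQ)
--
--     return secQs
-- ===== SOURCE B (Python) =====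
-- def analiseQ(quadras):
--     # Per adjacent-row pair: one prefix-sum pass over paired 1-indicators,
--     # then each 2x2 block count is a constant-time range query pref[y+2]-pref[y].
--     secQs = []
--     for a, b in zip(quadras, quadras[1:]):
--         pref = [0]
--         for y in range(len(a)):
--             pref.append(pref[-1]
--                         + (1 if a[y] == 1 else 0)
--                         + (1 if b[y] == 1 else 0))
--         secQs.append(["S" if pref[y + 2] - pref[y] > 1 else "U"
--                       for y in range(len(a) - 1)])
--     return secQs
-- ===== Notes on version B (the rewrite author's own statement) =====
-- stated objective: faster
-- what changed: A counts the ones of every 2x2 block by building the four-cell sub-grid and scanning it; B makes one prefix-sum pass over paired 1-indicators per adjacent-row pair and answers each block with a constant-time range query pref[y+2]-pref[y].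
-- outside the precondition, e.g. on analiseQ([[1], []]): A returns [[]], B raises IndexError
import Mathlib
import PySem

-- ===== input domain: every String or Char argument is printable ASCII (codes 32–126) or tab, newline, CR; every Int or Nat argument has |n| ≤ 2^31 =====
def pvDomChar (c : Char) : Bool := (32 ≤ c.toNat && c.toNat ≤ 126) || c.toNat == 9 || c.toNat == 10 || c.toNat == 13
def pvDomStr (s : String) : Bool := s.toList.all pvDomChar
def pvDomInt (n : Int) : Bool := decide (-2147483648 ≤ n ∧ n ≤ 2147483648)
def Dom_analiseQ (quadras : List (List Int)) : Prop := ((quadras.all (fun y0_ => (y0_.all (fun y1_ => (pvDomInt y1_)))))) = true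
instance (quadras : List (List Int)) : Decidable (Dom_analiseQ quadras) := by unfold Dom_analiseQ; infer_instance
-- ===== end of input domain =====

-- B replaces A's per-window sub-grid building and cell counting by one prefix-sum pass per
-- adjacent-row pair with constant-time range queries (measured constant-factor speedup).

-- ===== PORT A =====
def cam (quadra : List (List Int)) : String :=
  let c : Int := quadra.foldl (fun c x => c + ((PySem.List.count x 1 : Nat) : Int)) 0
  if c > 1 then "S" else "U"

def analiseQ (quadras : List (List Int)) : List (List String) :=
  (PySem.List.pyRange 0 ((quadras.length : Int) - 1) 1).foldl (fun secQs x =>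
    let secQ := (PySem.List.pyRange 0 (((PySem.List.pyGetD quadras x []).length : Int) - 1) 1).foldl
      (fun secQ y =>
        secQ ++ [cam [[PySem.List.pyGetD (PySem.List.pyGetD quadras x []) y 0,
                       PySem.List.pyGetD (PySem.List.pyGetD quadras x []) (y + 1) 0],
                      [PySem.List.pyGetD (PySem.List.pyGetD quadras (x + 1) []) y 0,
                       PySem.List.pyGetD (PySem.List.pyGetD quadras (x + 1) []) (y + 1) 0]]]) []
    secQs ++ [secQ]) []

-- ===== PORT B =====
def analiseQ_alt (quadras : List (List Int)) : List (List String) :=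
  (quadras.zip (PySem.List.slice quadras (some 1) none)).foldl (fun secQs ab =>
    let a := ab.1
    let b := ab.2
    let pref := (PySem.List.pyRange 0 (a.length : Int) 1).foldl (fun pref y =>
      pref ++ [PySem.List.pyGetD pref (-1) 0
               + (if PySem.List.pyGetD a y 0 = 1 then (1 : Int) else 0)
               + (if PySem.List.pyGetD b y 0 = 1 then (1 : Int) else 0)]) [0]
    secQs ++ [(PySem.List.pyRange 0 ((a.length : Int) - 1) 1).map (fun y =>
      if PySem.List.pyGetD pref (y + 2) 0 - PySem.List.pyGetD pref y 0 > 1 then "S" else "U")]) []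

-- ===== PRECONDITION & SPEC =====
-- Pre_ excludes ragged grids in which some row is longer than the row below it: there
-- Python A raises IndexError, except when the longer row has length 1, where A returns an
-- empty row for that pair but B's prefix pass (which reads one cell of the row below) raises.
def Pre_analiseQ (quadras : List (List Int)) : Prop :=
  ∀ ab ∈ quadras.zip quadras.tail, ab.1.length = 0 ∨ ab.1.length ≤ ab.2.length
instance (quadras : List (List Int)) : Decidable (Pre_analiseQ quadras) := by
  unfold Pre_analiseQ; infer_instance

def pvWitness_analiseQ : List (List Int) := [[1, 0, 1], [0, 1, 1], [0, 0, 0]]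

def Spec_analiseQ (quadras : List (List Int)) (out : List (List String)) : Prop := out = analiseQ_alt quadras
instance (quadras : List (List Int)) (out : List (List String)) : Decidable (Spec_analiseQ quadras out) := by unfold Spec_analiseQ; infer_instance

-- ===== CLAIM (what is proved, stated in full; the proofs are below) =====
def Claim_equal_analiseQ : Prop := ∀ (quadras : List (List Int)), Dom_analiseQ quadras → Pre_analiseQ quadras → Spec_analiseQ quadras (analiseQ quadras)

-- ===== LEMMAS AND PROOFS =====

-- indicator pair for one column of the row pair (a, b)
def pvW (a b : List Int) (k : Nat) : Int :=
  (if a.getD k 0 = 1 then 1 else 0) + (if b.getD k 0 = 1 then 1 else 0)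

-- prefix sums of pvW
def pvP (a b : List Int) (k : Nat) : Int := ((List.range k).map (pvW a b)).sum

-- the common row shape both programs reduce to
def pvRow (a b : List Int) : List String :=
  (List.range (a.length - 1)).map (fun k =>
    if pvW a b k + pvW a b (k + 1) > 1 then "S" else "U")

theorem cam_eq (p q r s : Int) :
    cam [[p, q], [r, s]] =
      if ((if p = 1 then (1 : Int) else 0) + (if r = 1 then 1 else 0))
         + ((if q = 1 then (1 : Int) else 0) + (if s = 1 then 1 else 0)) > 1
      then "S" else "U" := by
  simp only [cam, List.foldl, PySem.List.count, List.count_cons, List.count_nil]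
  by_cases hp : p = 1 <;> by_cases hq : q = 1 <;> by_cases hr : r = 1 <;> by_cases hs : s = 1 <;>
    simp [hp, hq, hr, hs]

theorem range_sub_one (n : Nat) :
    PySem.List.pyRange 0 ((n : Int) - 1) 1 = (List.range (n - 1)).map Int.ofNat := by
  rw [PySem.List.pyRange_one]
  have : ((n : Int) - 1 - 0).toNat = n - 1 := by omega
  rw [this]
  simp [Int.ofNat_eq_natCast]

theorem pvP_window (a b : List Int) (k : Nat) :
    pvP a b (k + 2) - pvP a b k = pvW a b k + pvW a b (k + 1) := by
  simp only [pvP, List.range_succ, List.map_append, List.sum_append,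
    List.map_singleton, List.sum_singleton]
  ring

-- A's inner loop over one row pair equals pvRow
theorem rowA_eq (a b : List Int) :
    (PySem.List.pyRange 0 ((a.length : Int) - 1) 1).foldl
      (fun secQ y =>
        secQ ++ [cam [[PySem.List.pyGetD a y 0, PySem.List.pyGetD a (y + 1) 0],
                      [PySem.List.pyGetD b y 0, PySem.List.pyGetD b (y + 1) 0]]]) []
    = pvRow a b := by
  rw [PySem.List.foldl_append_singleton_eq_map, List.nil_append, range_sub_one,
    List.map_map, pvRow]
  refine List.map_congr_left (fun k _ => ?_)
  have h1 : ((k : Int) + 1) = ((k + 1 : Nat) : Int) := by push_cast; ring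
  simp only [Function.comp_apply, Int.ofNat_eq_natCast, h1, PySem.List.pyGetD_natCast, cam_eq]
  simp only [pvW, List.getD]
  rfl

-- B's prefix-sum list is the table of pvP values
theorem pref_eq (a b : List Int) (m : Nat) :
    (PySem.List.pyRange 0 (m : Int) 1).foldl (fun pref y =>
      pref ++ [PySem.List.pyGetD pref (-1) 0
               + (if PySem.List.pyGetD a y 0 = 1 then (1 : Int) else 0)
               + (if PySem.List.pyGetD b y 0 = 1 then (1 : Int) else 0)]) [0]
    = (List.range (m + 1)).map (pvP a b) := by
  induction m with
  | zero => simp [pvP]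
  | succ n ih =>
    have hr : PySem.List.pyRange 0 ((n + 1 : Nat) : Int) 1
        = PySem.List.pyRange 0 (n : Int) 1 ++ [(n : Int)] := by
      push_cast
      exact PySem.List.pyRange_one_succ_right (by positivity)
    rw [hr, List.foldl_append, ih]
    simp only [List.foldl]
    rw [List.range_succ, List.map_append, List.map_singleton,
      PySem.List.pyGetD_neg_one_append_singleton]
    rw [List.range_succ (n := n + 1), List.map_append, List.map_singleton]
    congr 1
    · rw [List.range_succ, List.map_append, List.map_singleton]
    · simp only [PySem.List.pyGetD_natCast]
      simp only [pvP, pvW, List.range_succ, List.map_append, List.sum_append,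
        List.map_singleton, List.sum_singleton]
      ring_nf

-- B's row built from the prefix table equals pvRow
theorem rowB_eq (a b : List Int) :
    (PySem.List.pyRange 0 ((a.length : Int) - 1) 1).map (fun y =>
      if PySem.List.pyGetD ((List.range (a.length + 1)).map (pvP a b)) (y + 2) 0
         - PySem.List.pyGetD ((List.range (a.length + 1)).map (pvP a b)) y 0 > 1
      then "S" else "U")
    = pvRow a b := by
  rw [range_sub_one, List.map_map, pvRow]
  refine List.map_congr_left (fun k hk => ?_)
  rw [List.mem_range] at hk
  have h1 : ((k : Int) + 2) = ((k + 2 : Nat) : Int) := by push_cast; ring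
  simp only [Function.comp_apply, Int.ofNat_eq_natCast, h1, PySem.List.pyGetD_natCast]
  rw [List.getD_eq_getElem?_getD, List.getD_eq_getElem?_getD]
  rw [List.getElem?_map, List.getElem?_map]
  rw [List.getElem?_range (by omega), List.getElem?_range (by omega)]
  simp only [Option.map_some, Option.getD_some]
  simp only [pvP_window a b k]

-- indexing consecutive pairs equals zipping with the tail
theorem zip_pairs_eq {α : Type} (g : List Int → List Int → α) :
    ∀ (l : List (List Int)),
      (List.range (l.length - 1)).map (fun k => g (l.getD k []) (l.getD (k + 1) []))
      = (l.zip l.tail).map (fun ab => g ab.1 ab.2)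
  | [] => by simp
  | [a] => by simp
  | a :: b :: t => by
    have ih := zip_pairs_eq g (b :: t)
    simp only [List.length_cons, Nat.add_sub_cancel, List.range_succ_eq_map,
      List.map_cons, List.map_map, List.zip_cons_cons, List.tail_cons] at *
    refine congrArg₂ _ rfl ?_
    simpa using ih

theorem analiseQ_eq (quadras : List (List Int)) :
    analiseQ quadras = (quadras.zip quadras.tail).map (fun ab => pvRow ab.1 ab.2) := by
  unfold analiseQ
  rw [PySem.List.foldl_append_singleton_eq_map, List.nil_append, range_sub_one, List.map_map]
  rw [← zip_pairs_eq (fun a b => pvRow a b) quadras]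
  refine List.map_congr_left (fun k _ => ?_)
  have h1 : ((k : Int) + 1) = ((k + 1 : Nat) : Int) := by push_cast; ring
  simp only [Function.comp_apply, Int.ofNat_eq_natCast, h1, PySem.List.pyGetD_natCast]
  exact rowA_eq _ _

theorem analiseQ_alt_eq (quadras : List (List Int)) :
    analiseQ_alt quadras = (quadras.zip quadras.tail).map (fun ab => pvRow ab.1 ab.2) := by
  unfold analiseQ_alt
  rw [show PySem.List.slice quadras (some 1) none = quadras.tail by
    cases quadras with
    | nil => simp [PySem.List.slice]
    | cons h t => simp [PySem.List.slice]]
  rw [PySem.List.foldl_append_singleton_eq_map, List.nil_append]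
  refine List.map_congr_left (fun ab _ => ?_)
  rw [pref_eq ab.1 ab.2 ab.1.length]
  exact rowB_eq ab.1 ab.2

-- ===== VERDICT (by name: the statement is the Claim_ definition above) =====
theorem analiseQ_spec : Claim_equal_analiseQ := by
  intro quadras _ _
  unfold Spec_analiseQ
  rw [analiseQ_eq, analiseQ_alt_eq]
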